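-- pv_equiv track=rewrite | github.com/coval-ai/benchmarks | runner/src/coval_bench/metrics/wer.py | _squish_numbers
-- ===== SOURCE A (Python) =====
-- def _squish_numbers(sentence: str) -> str:
--     """Remove spaces between consecutive digit characters."""
--     chars = list(sentence)
--     if len(chars) < 3:
--         return sentence
--     filtered: list[str] = []
--     for i, ch in enumerate(chars):
--         if i == 0 or i == len(chars) - 1:
--             filtered.append(ch)
--             continue
--         if chars[i - 1].isdigit() and ch == " " and chars[i + 1].isdigit():
--             continue
--         filtered.append(ch)
--     return "".join(filtered)
-- ===== SOURCE B (Python) =====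
-- def _squish_numbers(sentence: str) -> str:
--     """Remove spaces between consecutive digit characters."""
--     out = []
--     i = 0
--     n = len(sentence)
--     while i < n:
--         c = sentence[i]
--         out.append(c)
--         if c.isdigit() and i + 2 < n and sentence[i + 1] == " " and sentence[i + 2].isdigit():
--             i += 2  # skip the space between two digits
--         else:
--             i += 1
--     return "".join(out)
-- ===== Notes on version B (the rewrite author's own statement) =====
-- stated objective: simpler
-- what changed: Replaces A's whole-string enumerate loop with neighbour indexing (chars[i-1]/chars[i+1]) and special cases for length<3 and the first/last character by a single lookahead scan that emits each character and jumps over a digit-space-digit window; no length guard, no boundary cases, no indexing into the original list.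
import Mathlib
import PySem

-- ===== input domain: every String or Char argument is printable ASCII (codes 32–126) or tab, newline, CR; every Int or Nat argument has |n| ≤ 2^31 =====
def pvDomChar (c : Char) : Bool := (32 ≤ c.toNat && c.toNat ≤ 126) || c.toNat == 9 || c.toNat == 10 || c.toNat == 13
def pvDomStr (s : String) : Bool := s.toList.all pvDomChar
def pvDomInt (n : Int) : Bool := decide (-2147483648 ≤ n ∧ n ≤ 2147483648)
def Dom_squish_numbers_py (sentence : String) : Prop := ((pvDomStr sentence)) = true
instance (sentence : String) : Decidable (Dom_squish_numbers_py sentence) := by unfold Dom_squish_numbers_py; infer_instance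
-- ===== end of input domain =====

-- B replaces A's whole-string index loop (with boundary special cases) by a single
-- lookahead scan that emits each character and jumps over a digit-space-digit window
-- (objective: simpler — no length guard, no first/last-char cases, no neighbour indexing).

-- ===== PORT A =====
-- Literal port of A: enumerate-indexed loop; chars[i-1]/chars[i+1] via pyGetD (always in range
-- on the branch that uses them, so the default ' ' is never returned).
def squish_numbers_py (sentence : String) : String :=
  let chars := sentence.toList
  if chars.length < 3 then sentence
  else
    let filtered : List Char :=
      (PySem.List.enumerate chars 0).foldl (fun acc p =>
        if p.1 == 0 || p.1 == (chars.length : Int) - 1 then acc ++ [p.2]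
        else if PySem.Chars.isdigit (PySem.List.pyGetD chars (p.1 - 1) ' ')
                && p.2 == ' '
                && PySem.Chars.isdigit (PySem.List.pyGetD chars (p.1 + 1) ' ') then acc
        else acc ++ [p.2]) []
    String.ofList filtered

-- ===== PORT B =====
-- B's while loop with lookahead, as structural recursion on the remaining characters:
-- emit the head, and jump two when the head is a digit followed by ' ' and a digit.
def sqB : List Char → List Char
  | [] => []
  | [c] => [c]
  | [c1, c2] => [c1, c2]
  | c1 :: c2 :: c3 :: rest =>
    if PySem.Chars.isdigit c1 && c2 == ' ' && PySem.Chars.isdigit c3 then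
      c1 :: sqB (c3 :: rest)
    else
      c1 :: sqB (c2 :: c3 :: rest)

def squish_numbers_py_alt (sentence : String) : String :=
  String.ofList (sqB sentence.toList)

-- ===== PRECONDITION & SPEC =====
def Spec_squish_numbers_py (sentence : String) (out : String) : Prop := out = squish_numbers_py_alt sentence
instance (sentence : String) (out : String) : Decidable (Spec_squish_numbers_py sentence out) := by unfold Spec_squish_numbers_py; infer_instance

-- ===== CLAIM (what is proved, stated in full; the proofs are below) =====
def Claim_equal_squish_numbers_py : Prop := ∀ (sentence : String), Dom_squish_numbers_py sentence → Spec_squish_numbers_py sentence (squish_numbers_py sentence)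

-- ===== LEMMAS AND PROOFS =====

-- One step of A's loop, as a function of the index and character (full = the whole char list).
def gStep (full : List Char) (p : Int × Char) : List Char :=
  if p.1 == 0 || p.1 == (full.length : Int) - 1 then [p.2]
  else if PySem.Chars.isdigit (PySem.List.pyGetD full (p.1 - 1) ' ')
          && p.2 == ' '
          && PySem.Chars.isdigit (PySem.List.pyGetD full (p.1 + 1) ' ') then []
  else [p.2]

-- A's filtering, re-expressed index-free: keep c unless prev is a digit, c is ' ', next is a digit.
def optDigit : Option Char → Bool
  | none => false
  | some c => PySem.Chars.isdigit c

def gA (prev : Option Char) : List Char → List Char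
  | [] => []
  | c :: rest =>
    (if optDigit prev && c == ' ' && optDigit rest.head? then [] else [c]) ++ gA (some c) rest

theorem foldl_eq_flat (full l : List Char) (s : Int) (acc : List Char) :
    (PySem.List.enumerate l s).foldl (fun (acc : List Char) (p : Int × Char) =>
        if p.1 == 0 || p.1 == (full.length : Int) - 1 then acc ++ [p.2]
        else if PySem.Chars.isdigit (PySem.List.pyGetD full (p.1 - 1) ' ')
                && p.2 == ' '
                && PySem.Chars.isdigit (PySem.List.pyGetD full (p.1 + 1) ' ') then acc
        else acc ++ [p.2]) acc
      = acc ++ (PySem.List.enumerate l s).flatMap (gStep full) := by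
  have h : (fun (acc : List Char) (p : Int × Char) =>
        if p.1 == 0 || p.1 == (full.length : Int) - 1 then acc ++ [p.2]
        else if PySem.Chars.isdigit (PySem.List.pyGetD full (p.1 - 1) ' ')
                && p.2 == ' '
                && PySem.Chars.isdigit (PySem.List.pyGetD full (p.1 + 1) ' ') then acc
        else acc ++ [p.2])
      = fun acc p => acc ++ gStep full p := by
    funext acc p
    unfold gStep
    split_ifs <;> simp
  rw [h, PySem.List.foldl_append_eq_flatMap]

theorem flat_eq_gA : ∀ (t pre : List Char),
    (PySem.List.enumerate t (pre.length : Int)).flatMap (gStep (pre ++ t))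
      = gA pre.getLast? t := by
  intro t
  induction t with
  | nil => intro pre; simp [PySem.List.enumerate_nil, gA]
  | cons c rest ih =>
    intro pre
    rw [PySem.List.enumerate_cons]
    have hih := ih (pre ++ [c])
    simp only [List.length_append, List.length_cons, List.length_nil, List.append_assoc,
      List.singleton_append, Nat.cast_add, Nat.cast_one] at hih
    norm_num at hih
    rw [List.flatMap_cons, hih]
    show gStep (pre ++ c :: rest) ((pre.length : Int), c) ++ gA (some c) rest
        = gA pre.getLast? (c :: rest)
    congr 1
    -- head step equals gA's head condition
    unfold gStep
    dsimp only
    by_cases hpre : pre = []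
    · subst hpre
      simp [optDigit]
    · -- pre nonempty: index ≠ 0
      have hplen : 0 < pre.length := List.length_pos_iff.mpr hpre
      have h0 : ((pre.length : Int) == 0) = false := by
        simp; omega
      have hlast' : pre.getLast? = some (pre.getLast hpre) := List.getLast?_eq_some_getLast hpre
      by_cases hrest : rest = []
      · -- last index: kept by A; gA condition false since rest.head? = none
        subst hrest
        have h1 : ((pre.length : Int) == (((pre ++ [c]).length : Int) - 1)) = true := by
          simp
        simp only [h0, h1, Bool.false_or, if_true]
        simp [optDigit, hlast']
      · have h1 : ((pre.length : Int) == (((pre ++ c :: rest).length : Int) - 1)) = false := by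
          have : rest.length > 0 := List.length_pos_iff.mpr hrest
          simp; omega
        simp only [h0, h1, Bool.false_or]
        have hprev : PySem.List.pyGetD (pre ++ c :: rest) ((pre.length : Int) - 1) ' '
            = pre.getLast hpre := by
          have : ((pre.length : Int) - 1) = ((pre.length - 1 : Nat) : Int) := by omega
          rw [this, PySem.List.pyGetD_natCast]
          rw [List.getD_eq_getElem _ _ (by simp; omega)]
          rw [List.getElem_append_left (by omega)]
          exact (List.getLast_eq_getElem hpre).symm
        have hnext : PySem.List.pyGetD (pre ++ c :: rest) ((pre.length : Int) + 1) ' '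
            = rest.headD ' ' := by
          have : ((pre.length : Int) + 1) = ((pre.length + 1 : Nat) : Int) := by omega
          rw [this, PySem.List.pyGetD_natCast]
          have hlt : pre.length + 1 < (pre ++ c :: rest).length := by
            simp; have := List.length_pos_iff.mpr hrest; omega
          rw [List.getD_eq_getElem _ _ hlt]
          rw [List.getElem_append_right (by omega)]
          simp only [Nat.add_sub_cancel_left]
          cases rest with
          | nil => exact absurd rfl hrest
          | cons r rs => simp
        rw [hprev, hnext]
        have hhd : optDigit rest.head? = PySem.Chars.isdigit (rest.headD ' ') := by
          cases rest with
          | nil => exact absurd rfl hrest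
          | cons r rs => simp [optDigit]
        rw [hhd, hlast']
        simp [optDigit]

theorem gA_eq_sqB' : ∀ (l : List Char) (prev : Option Char),
    (optDigit prev && (l.headD 'x' == ' ') && optDigit l.tail.head?) = false →
    gA prev l = sqB l := by
  intro l
  induction l using sqB.induct with
  | case1 => intro prev _; rfl
  | case2 c => intro prev h; simp [gA, sqB]; exact fun _ _ => rfl
  | case3 c1 c2 =>
    intro prev h
    simp only [List.headD_cons, List.tail_cons, List.head?_cons] at h
    unfold gA
    simp only [List.head?_cons, h, Bool.false_eq_true, if_false, List.singleton_append]
    simp [gA, sqB, optDigit]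
  | case4 c1 c2 c3 rest hcond ih =>
    intro prev h
    simp only [List.headD_cons, List.tail_cons, List.head?_cons] at h
    unfold gA
    simp only [List.head?_cons, h, Bool.false_eq_true, if_false, List.singleton_append]
    unfold sqB
    rw [if_pos hcond]
    congr 1
    unfold gA
    have hsp : (optDigit (some c1) && c2 == ' ' && optDigit (some c3)) = true := by
      simpa [optDigit] using hcond
    simp only [List.head?_cons, hsp, if_true, List.nil_append]
    apply ih
    -- after the skipped space, prev = ' ', which is not a digit
    have hc2 : optDigit (some c2) = false := by
      simp only [Bool.and_eq_true] at hcond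
      have hsp2 : c2 = ' ' := eq_of_beq hcond.1.2
      rw [hsp2]; decide
    simp [hc2]
  | case5 c1 c2 c3 rest hcond ih =>
    intro prev h
    simp only [List.headD_cons, List.tail_cons, List.head?_cons] at h
    unfold gA
    simp only [List.head?_cons, h, Bool.false_eq_true, if_false, List.singleton_append]
    unfold sqB
    rw [if_neg (by simpa using hcond)]
    congr 1
    apply ih
    simpa [optDigit] using hcond

theorem sqB_short (l : List Char) (h : l.length < 3) : sqB l = l := by
  match l, h with
  | [], _ => rfl
  | [c], _ => rfl
  | [c1, c2], _ => rfl

-- ===== VERDICT (by name: the statement is the Claim_ definition above) =====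
theorem squish_numbers_py_spec : Claim_equal_squish_numbers_py := by
  intro sentence _
  show squish_numbers_py sentence = squish_numbers_py_alt sentence
  unfold squish_numbers_py squish_numbers_py_alt
  by_cases h : sentence.toList.length < 3
  · simp only [h, if_true]
    rw [sqB_short _ h]
    exact String.ofList_toList.symm
  · simp only [h, if_false]
    have hfold := foldl_eq_flat sentence.toList sentence.toList 0 []
    have hflat := flat_eq_gA sentence.toList []
    simp only [List.length_nil, Nat.cast_zero, List.nil_append, List.getLast?_nil] at hflat
    have hga := gA_eq_sqB' sentence.toList none (by simp [optDigit])
    rw [hfold, hflat, hga]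
    simp
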